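-- pv_equiv track=rewrite | github.com/vojtadavid/IV122 | 07/l_system.py | grammar
-- ===== SOURCE A (Python) =====
-- def grammar(root="A",terminals=[],nonterminals=['A','B'],dictOfRulues={'A':"AB",'B':"A"},n=7):
--     output=root
--
--     for i in range(n):
--         temp=""
--         for x in output:
--             if x in nonterminals:
--                 temp = temp + dictOfRulues[x]
--             if x in terminals:
--                 temp = temp + x
--
--         output=temp
--
--     return output
-- ===== SOURCE B (Python) =====
-- def grammar(root="A", terminals=[], nonterminals=['A', 'B'], dictOfRulues={'A': "AB", 'B': "A"}, n=7):
--     def expand_one(x):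
--         s = ""
--         if x in nonterminals:
--             s += dictOfRulues[x]
--         if x in terminals:
--             s += x
--         return s
--
--     # depth-first expansion with an explicit stack of (string, remaining depth)
--     pieces = []
--     stack = [(root, n)]
--     while stack:
--         s, depth = stack.pop()
--         if depth <= 0:
--             pieces.append(s)
--         else:
--             for x in reversed(s):
--                 stack.append((expand_one(x), depth - 1))
--     return "".join(pieces)
-- ===== Notes on version B (the rewrite author's own statement) =====
-- stated objective: alternative
-- what changed: Replaces A's breadth-first level-by-level rewriting loop with a depth-first per-symbol expansion driven by an explicit stack of (string, remaining-depth) pairs, emitting finished pieces left to right.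
import Mathlib
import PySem

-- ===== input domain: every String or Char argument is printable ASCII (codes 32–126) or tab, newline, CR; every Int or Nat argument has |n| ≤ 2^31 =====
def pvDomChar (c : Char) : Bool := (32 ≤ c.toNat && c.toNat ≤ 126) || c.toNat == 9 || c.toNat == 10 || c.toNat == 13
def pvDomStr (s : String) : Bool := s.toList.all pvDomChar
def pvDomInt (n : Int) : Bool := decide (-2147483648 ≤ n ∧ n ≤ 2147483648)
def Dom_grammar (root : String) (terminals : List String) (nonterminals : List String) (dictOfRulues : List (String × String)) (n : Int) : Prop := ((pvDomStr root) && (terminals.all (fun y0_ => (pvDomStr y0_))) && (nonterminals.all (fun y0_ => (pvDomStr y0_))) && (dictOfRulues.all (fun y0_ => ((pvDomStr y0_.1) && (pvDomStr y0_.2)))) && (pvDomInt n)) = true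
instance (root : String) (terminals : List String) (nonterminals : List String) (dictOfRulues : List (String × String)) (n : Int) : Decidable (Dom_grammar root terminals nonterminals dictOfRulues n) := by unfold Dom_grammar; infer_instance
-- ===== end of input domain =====

-- B replaces A's breadth-first level-by-level rewrite loop with a depth-first per-symbol
-- expansion driven by an explicit stack (objective: alternative, same cost).


-- ===== PORT A =====
-- One inner pass of A's loop (for x in output: two independent ifs appending to temp).
-- Strings are carried as List Char (Python iterates a str char by char); the rule lookup
-- dictOfRulues[x] is PySem.Dict.get? (under Pre_ it is always some; getD "" never fires).
def grammarStepA (terminals nonterminals : List String) (dictOfRulues : List (String × String)) (s : List Char) : List Char :=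
  s.foldl (fun temp x =>
    let temp1 := if nonterminals.contains (String.ofList [x])
      then temp ++ ((PySem.Dict.get? (PySem.Dict.ofList dictOfRulues) (String.ofList [x])).getD "").toList else temp
    if terminals.contains (String.ofList [x]) then temp1 ++ [x] else temp1) []

def grammar (root : String) (terminals : List String) (nonterminals : List String) (dictOfRulues : List (String × String)) (n : Int) : String :=
  -- for i in range(n): output = step(output)   (range(n) is empty for n ≤ 0)
  String.ofList ((List.range n.toNat).foldl
    (fun output _ => grammarStepA terminals nonterminals dictOfRulues output) root.toList)

-- ===== PORT B =====
-- expand_one(x): nonterminal part ++ terminal part.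
def expandOneB (terminals nonterminals : List String) (dictOfRulues : List (String × String)) (x : Char) : List Char :=
  (if nonterminals.contains (String.ofList [x])
    then ((PySem.Dict.get? (PySem.Dict.ofList dictOfRulues) (String.ofList [x])).getD "").toList else [])
  ++ (if terminals.contains (String.ofList [x]) then [x] else [])

-- Termination bookkeeping for B's stack loop (proof data only, not part of the algorithm):
-- every expansion of one symbol has length < ruleBoundB - 2, and each stack entry (s, d)
-- weighs (|s|+1) * ruleBoundB^d; popping an entry strictly decreases the total weight.
def ruleBoundB (dictOfRulues : List (String × String)) : Nat :=
  ((PySem.Dict.ofList dictOfRulues).values.map (fun v => v.toList.length)).foldr Nat.max 0 + 3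

-- push the per-symbol expansions of s (leftmost symbol ends on top of the stack).
def pushB (terminals nonterminals : List String) (dictOfRulues : List (String × String))
    (k : Nat) (s : List Char) : List (List Char × Nat) :=
  s.map (fun x => (expandOneB terminals nonterminals dictOfRulues x, k))

def dfsMeasureB (dictOfRulues : List (String × String)) (stack : List (List Char × Nat)) : Nat :=
  (stack.map (fun e => (e.1.length + 1) * (ruleBoundB dictOfRulues) ^ e.2)).sum

theorem le_foldr_max (l : List Nat) (a : Nat) (h : a ∈ l) : a ≤ l.foldr Nat.max 0 := by
  induction l with
  | nil => simp at h
  | cons b l ih =>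
      rcases List.mem_cons.mp h with rfl | h
      · exact Nat.le_max_left _ _
      · exact le_trans (ih h) (Nat.le_max_right _ _)

theorem expandOneB_len (t nt : List String) (dd : List (String × String)) (x : Char) :
    (expandOneB t nt dd x).length + 1 ≤ ruleBoundB dd - 1 := by
  unfold expandOneB ruleBoundB
  have hrule : ∀ s : String, ((PySem.Dict.get? (PySem.Dict.ofList dd) s).getD "").toList.length
      ≤ ((PySem.Dict.ofList dd).values.map (fun v => v.toList.length)).foldr Nat.max 0 := by
    intro s
    cases hg : PySem.Dict.get? (PySem.Dict.ofList dd) s with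
    | none => simp
    | some v =>
        have hmem : (s, v) ∈ (PySem.Dict.ofList dd).items :=
          PySem.Dict.mem_items_of_get?_eq_some _ hg
        have hv : v ∈ (PySem.Dict.ofList dd).values := by
          simp only [PySem.Dict.values]
          exact List.mem_map.mpr ⟨(s, v), hmem, rfl⟩
        simp only [Option.getD_some]
        exact le_foldr_max _ _ (List.mem_map.mpr ⟨v, hv, rfl⟩)
  have h1 := hrule (String.ofList [x])
  split_ifs <;> simp only [List.length_append, List.length_nil, List.length_cons] <;> omega

theorem sum_map_le_length_mul {α : Type} (l : List α) (f : α → Nat) (c : Nat)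
    (h : ∀ x ∈ l, f x ≤ c) : (l.map f).sum ≤ l.length * c := by
  induction l with
  | nil => simp
  | cons a l ih =>
      simp only [List.map_cons, List.sum_cons, List.length_cons]
      have := ih (fun x hx => h x (List.mem_cons_of_mem a hx))
      have := h a (List.mem_cons_self)
      nlinarith

theorem dfsB_dec (t nt : List String) (dd : List (String × String)) (s : List Char) (k : Nat)
    (rest : List (List Char × Nat)) :
    dfsMeasureB dd (pushB t nt dd k s ++ rest) <
      dfsMeasureB dd ((s, k + 1) :: rest) := by
  unfold dfsMeasureB pushB
  simp only [List.map_append, List.sum_append, List.map_cons, List.sum_cons, List.map_map]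
  have hW3 : 3 ≤ ruleBoundB dd := by unfold ruleBoundB; omega
  obtain ⟨W', hW⟩ : ∃ W', ruleBoundB dd = W' + 3 := ⟨ruleBoundB dd - 3, by omega⟩
  rw [hW]
  have hbound : (s.map (fun x => ((expandOneB t nt dd x).length + 1) * (W' + 3) ^ k)).sum
      ≤ s.length * ((W' + 2) * (W' + 3) ^ k) := by
    apply sum_map_le_length_mul
    intro x _
    apply Nat.mul_le_mul_right
    have := expandOneB_len t nt dd x
    omega
  have hlt : s.length * ((W' + 2) * (W' + 3) ^ k) < (s.length + 1) * (W' + 3) ^ (k + 1) := by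
    have hpow : 1 ≤ (W' + 3) ^ k := Nat.one_le_pow _ _ (by omega)
    calc s.length * ((W' + 2) * (W' + 3) ^ k)
        = (s.length * (W' + 2)) * (W' + 3) ^ k := by ring
      _ < ((s.length + 1) * (W' + 3)) * (W' + 3) ^ k := by
          apply Nat.mul_lt_mul_of_lt_of_le _ (Nat.le_refl _) (by positivity)
          nlinarith
      _ = (s.length + 1) * (W' + 3) ^ (k + 1) := by rw [pow_succ]; ring
  simp only [Function.comp_def]
  omega

-- while stack: pop (s, depth); if depth <= 0 emit s, else push (expand_one(x), depth-1)
-- for x in reversed(s) (head of the list = top of the stack, so pushes are a map-prepend);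
-- pieces are accumulated in output order and joined at the end.
def dfsB (terminals nonterminals : List String) (dictOfRulues : List (String × String)) :
    List (List Char × Nat) → List Char → List Char
  | [], out => out
  | (s, 0) :: rest, out => dfsB terminals nonterminals dictOfRulues rest (out ++ s)
  | (s, k + 1) :: rest, out =>
      dfsB terminals nonterminals dictOfRulues
        (pushB terminals nonterminals dictOfRulues k s ++ rest) out
termination_by stack _ => dfsMeasureB dictOfRulues stack
decreasing_by
  · simp [dfsMeasureB]
  · exact dfsB_dec terminals nonterminals dictOfRulues s k rest

def grammar_alt (root : String) (terminals : List String) (nonterminals : List String) (dictOfRulues : List (String × String)) (n : Int) : String :=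
  String.ofList (dfsB terminals nonterminals dictOfRulues [(root.toList, n.toNat)] [])

-- ===== PRECONDITION & SPEC =====
-- A "bad" symbol is a character that is listed in nonterminals but has no rule:
-- expanding it evaluates dictOfRulues[x] and raises KeyError (in A and in B alike).
def badSymB (nonterminals : List String) (dictOfRulues : List (String × String)) (x : Char) : Bool :=
  nonterminals.contains (String.ofList [x]) && (PySem.Dict.get? (PySem.Dict.ofList dictOfRulues) (String.ofList [x])).isNone

-- Successor set of one character in the symbol graph: rule characters if it is a (ruled)
-- nonterminal, plus itself if it is a terminal; characters in neither list have no successors.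
def charSuccs (terminals nonterminals : List String) (dictOfRulues : List (String × String)) (x : Char) : List Char :=
  (if nonterminals.contains (String.ofList [x])
    then ((PySem.Dict.get? (PySem.Dict.ofList dictOfRulues) (String.ofList [x])).getD "").toList else [])
  ++ (if terminals.contains (String.ofList [x]) then [x] else [])

-- Is a bad symbol reachable from character set cs within `fuel` levels of the symbol graph?
-- This walks over SETS of distinct characters (PySem.Set), not over the rewritten strings.
def badReachable (terminals nonterminals : List String) (dictOfRulues : List (String × String)) : Nat → List Char → Bool
  | 0, _ => false
  | fuel + 1, cs =>
      cs.any (badSymB nonterminals dictOfRulues) ||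
      badReachable terminals nonterminals dictOfRulues fuel
        (PySem.Set.ofList (cs.flatMap (charSuccs terminals nonterminals dictOfRulues)))

-- Pre_ excludes EXACTLY the inputs on which A (and B) raise KeyError: an unruled nonterminal
-- character occurs in one of the first n generations, i.e. is reachable from root's characters
-- in < n steps of the symbol graph; Dom's alphabet has ≤ 101 characters, so any reachable bad
-- symbol is reachable in < 200 steps and the level count can be capped at min(n, 200).
def Pre_grammar (root : String) (terminals : List String) (nonterminals : List String) (dictOfRulues : List (String × String)) (n : Int) : Prop :=
  badReachable terminals nonterminals dictOfRulues (min n.toNat 200) (PySem.Set.ofList root.toList) = false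
instance (root : String) (terminals : List String) (nonterminals : List String) (dictOfRulues : List (String × String)) (n : Int) : Decidable (Pre_grammar root terminals nonterminals dictOfRulues n) := by unfold Pre_grammar; infer_instance

def pvWitness_grammar : String × List String × List String × (List (String × String)) × Int :=
  ("A", [], ["A", "B"], [("A", "AB"), ("B", "A")], 3)

def Spec_grammar (root : String) (terminals : List String) (nonterminals : List String) (dictOfRulues : List (String × String)) (n : Int) (out : String) : Prop := out = grammar_alt root terminals nonterminals dictOfRulues n
instance (root : String) (terminals : List String) (nonterminals : List String) (dictOfRulues : List (String × String)) (n : Int) (out : String) : Decidable (Spec_grammar root terminals nonterminals dictOfRulues n out) := by unfold Spec_grammar; infer_instance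

-- ===== CLAIM (what is proved, stated in full; the proofs are below) =====
def Claim_equal_grammar : Prop := ∀ (root : String) (terminals : List String) (nonterminals : List String) (dictOfRulues : List (String × String)) (n : Int), Dom_grammar root terminals nonterminals dictOfRulues n → Pre_grammar root terminals nonterminals dictOfRulues n → Spec_grammar root terminals nonterminals dictOfRulues n (grammar root terminals nonterminals dictOfRulues n)

-- ===== LEMMAS AND PROOFS =====

-- A's inner pass appends expandOneB x for each x: the foldl is acc ++ flatMap expandOneB.
theorem stepA_foldl (t nt : List String) (d : List (String × String)) (s : List Char) :
    ∀ acc : List Char,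
      s.foldl (fun temp x =>
        let temp1 := if nt.contains (String.ofList [x])
          then temp ++ ((PySem.Dict.get? (PySem.Dict.ofList d) (String.ofList [x])).getD "").toList else temp
        if t.contains (String.ofList [x]) then temp1 ++ [x] else temp1) acc
      = acc ++ s.flatMap (expandOneB t nt d) := by
  induction s with
  | nil => intro acc; simp
  | cons x s ih =>
      intro acc
      simp only [List.foldl_cons, List.flatMap_cons, ih]
      unfold expandOneB
      split_ifs <;> simp

theorem stepA_eq (t nt : List String) (d : List (String × String)) (s : List Char) :
    grammarStepA t nt d s = s.flatMap (expandOneB t nt d) := by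
  unfold grammarStepA; exact stepA_foldl t nt d s []

theorem stepA_append (t nt : List String) (d : List (String × String)) (s u : List Char) :
    grammarStepA t nt d (s ++ u) = grammarStepA t nt d s ++ grammarStepA t nt d u := by
  simp [stepA_eq]

theorem stepA_iter_append (t nt : List String) (d : List (String × String)) (k : Nat) (s u : List Char) :
    (grammarStepA t nt d)^[k] (s ++ u) = (grammarStepA t nt d)^[k] s ++ (grammarStepA t nt d)^[k] u := by
  induction k generalizing s u with
  | zero => simp
  | succ k ih => simp [Function.iterate_succ_apply, stepA_append, ih]

theorem stepA_iter_nil (t nt : List String) (d : List (String × String)) (k : Nat) :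
    (grammarStepA t nt d)^[k] [] = [] := by
  induction k with
  | zero => rfl
  | succ k ih => simp [Function.iterate_succ_apply, stepA_eq, ih]

theorem stepA_iter_flatMap (t nt : List String) (d : List (String × String)) (k : Nat)
    (h : Char → List Char) (s : List Char) :
    (grammarStepA t nt d)^[k] (s.flatMap h) = (s.map (fun x => (grammarStepA t nt d)^[k] (h x))).flatten := by
  induction s with
  | nil => simp [stepA_iter_nil]
  | cons x s ih => simp [List.flatMap_cons, stepA_iter_append, ih]

-- B's stack loop: the result is out ++ the k-step expansion of every pending entry, in order.
theorem dfsB_eq (t nt : List String) (d : List (String × String))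
    (stack : List (List Char × Nat)) (out : List Char) :
    dfsB t nt d stack out
      = out ++ (stack.map (fun e => (grammarStepA t nt d)^[e.2] e.1)).flatten := by
  induction stack, out using dfsB.induct t nt d with
  | case1 out => simp [dfsB]
  | case2 s rest out ih => simp [dfsB, ih]
  | case3 s k rest out ih =>
      rw [dfsB, ih]
      simp only [pushB, List.map_append, List.map_map, List.map_cons, List.flatten_append,
        List.flatten_cons, Function.comp_def]
      rw [Function.iterate_succ_apply, stepA_eq, stepA_iter_flatMap]

-- A's range-fold is iteration of the step.
theorem foldl_range_iter {α : Type} (f : α → α) (m : Nat) (a : α) :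
    (List.range m).foldl (fun o _ => f o) a = f^[m] a := by
  induction m generalizing a with
  | zero => rfl
  | succ m ih => simp [List.range_succ, ih, Function.iterate_succ_apply']

-- ===== VERDICT (by name: the statement is the Claim_ definition above) =====
theorem grammar_spec : Claim_equal_grammar := by
  intro root t nt d n _ _
  unfold Spec_grammar grammar grammar_alt
  rw [foldl_range_iter, dfsB_eq]
  simp
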